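-- pv_equiv track=rewrite | github.com/srushwaghmare/DAA | B1.py | max_shops
-- ===== SOURCE A (Python) =====
-- def max_shops(S, E, K):
--     # Create a list of tuples representing each shop's start and end time
--     shops = sorted(zip(S, E), key=lambda x: x[1])
--
--     # Initialize an array to keep track of the end times for each person
--     person_end_times = [0] * K
--
--     # Count the total number of shops that can be visited
--     total_visits = 0
--
--     # For each shop, try to assign it to one of the K people
--     for shop in shops:
--         start, end = shop
--
--         # Try to assign the shop to a person optimally
--         for i in range(K):
--             if person_end_times[i] <= start:
--                 # If the person can visit this shop (i.e., no timing conflict)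
--                 person_end_times[i] = end  # Update the person's end time
--                 total_visits += 1  # Increment the count of total visits
--                 break  # Move to the next shop as this shop is assigned
--
--     return total_visits
-- ===== SOURCE B (Python) =====
-- def max_shops(S, E, K):
--     # Segment tree over the K persons, each node caching the minimum end time
--     # in its subtree: the leftmost person free at `start` is found by descending
--     # the tree in O(log K) instead of scanning all K slots.
--     shops = sorted(zip(S, E), key=lambda x: x[1])
--     if K <= 0:
--         return 0
--     t = _build(K)
--     total = 0
--     for start, end in shops:
--         nt = _assign(t, start, end)
--         if nt is not None:
--             t = nt
--             total += 1
--     return total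
--
--
-- def _build(k):
--     # balanced tree with k leaves, all end times 0
--     if k <= 1:
--         return ("L", 0)
--     h = k // 2
--     return ("N", 0, _build(h), _build(k - h))
--
--
-- def _min(t):
--     return t[1]
--
--
-- def _assign(t, start, end):
--     # replace the leftmost leaf with value <= start by `end`; None if no such leaf
--     if t[0] == "L":
--         if t[1] <= start:
--             return ("L", end)
--         return None
--     _, m, l, r = t
--     if start < m:
--         return None
--     nl = _assign(l, start, end)
--     if nl is not None:
--         return ("N", min(_min(nl), _min(r)), nl, r)
--     nr = _assign(r, start, end)
--     if nr is None:
--         return None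
--     return ("N", min(_min(l), _min(nr)), l, nr)
-- ===== Notes on version B (the rewrite author's own statement) =====
-- stated objective: faster
-- what changed: B replaces A's linear scan over the K-slot array by a segment tree over the K persons caching subtree minimum end times, descending to the leftmost free person in O(log K) per shop.
import Mathlib
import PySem

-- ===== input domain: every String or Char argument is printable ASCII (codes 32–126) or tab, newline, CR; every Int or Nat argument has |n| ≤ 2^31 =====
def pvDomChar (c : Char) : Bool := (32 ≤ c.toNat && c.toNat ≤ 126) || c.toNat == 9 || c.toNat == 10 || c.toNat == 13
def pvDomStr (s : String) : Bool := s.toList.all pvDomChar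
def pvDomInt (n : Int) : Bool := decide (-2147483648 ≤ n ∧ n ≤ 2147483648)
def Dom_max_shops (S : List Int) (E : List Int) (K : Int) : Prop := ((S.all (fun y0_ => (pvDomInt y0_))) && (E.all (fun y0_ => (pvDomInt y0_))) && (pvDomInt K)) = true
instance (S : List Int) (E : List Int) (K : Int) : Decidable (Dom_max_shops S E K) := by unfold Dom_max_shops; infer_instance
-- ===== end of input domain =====

-- B replaces A's linear scan over the K-slot array by a segment tree over the K persons
-- (each node caching its subtree's minimum end time), descending to the leftmost free
-- person in O(log K) per shop (objective: faster).

-- ===== PORT A =====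
-- inner loop 'for i in range(K): if person_end_times[i] <= start: …; break'
-- as a scan over the array, returning the updated array and whether a slot was taken
def pvScanA (start e : Int) : List Int → List Int × Bool
  | [] => ([], false)
  | t :: rest =>
      if t ≤ start then (e :: rest, true)
      else
        let r := pvScanA start e rest
        (t :: r.1, r.2)

-- one iteration of A's outer loop: state = (person_end_times, total_visits)
def pvStepA (st : List Int × Int) (shop : Int × Int) : List Int × Int :=
  let sc := pvScanA shop.1 shop.2 st.1
  (sc.1, if sc.2 then st.2 + 1 else st.2)

def max_shops (S : List Int) (E : List Int) (K : Int) : Int :=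
  ((PySem.List.sorted (S.zip E) (fun x => x.2) false).foldl
    pvStepA (PySem.List.pyRepeat [(0 : Int)] K, 0)).2

-- ===== PORT B =====
-- segment tree: a leaf holds one person's end time, a node caches its subtree minimum
inductive PvTree : Type
  | leaf : Int → PvTree
  | node : Int → PvTree → PvTree → PvTree
  deriving DecidableEq, Repr

def pvTMin : PvTree → Int
  | PvTree.leaf v => v
  | PvTree.node m _ _ => m

-- _build(k): balanced tree with k leaves, all end times 0
def pvBuild (k : Nat) : PvTree :=
  if h : k ≤ 1 then PvTree.leaf 0
  else PvTree.node 0 (pvBuild (k / 2)) (pvBuild (k - k / 2))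
  decreasing_by all_goals omega

-- _assign(t, start, end): replace the leftmost leaf with value <= start by `end`
def pvAssign (start e : Int) : PvTree → Option PvTree
  | PvTree.leaf v => if v ≤ start then some (PvTree.leaf e) else none
  | PvTree.node m l r =>
      if start < m then none
      else
        match pvAssign start e l with
        | some nl => some (PvTree.node (min (pvTMin nl) (pvTMin r)) nl r)
        | none =>
            match pvAssign start e r with
            | none => none
            | some nr => some (PvTree.node (min (pvTMin l) (pvTMin nr)) l nr)

-- one iteration of B's loop: state = (tree, total)
def pvStepB (st : PvTree × Int) (shop : Int × Int) : PvTree × Int :=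
  match pvAssign shop.1 shop.2 st.1 with
  | some nt => (nt, st.2 + 1)
  | none => st

def max_shops_alt (S : List Int) (E : List Int) (K : Int) : Int :=
  let shops := PySem.List.sorted (S.zip E) (fun x => x.2) false
  if K ≤ 0 then 0
  else (shops.foldl pvStepB (pvBuild K.toNat, 0)).2

-- ===== PRECONDITION & SPEC =====
def Spec_max_shops (S : List Int) (E : List Int) (K : Int) (out : Int) : Prop := out = max_shops_alt S E K
instance (S : List Int) (E : List Int) (K : Int) (out : Int) : Decidable (Spec_max_shops S E K out) := by unfold Spec_max_shops; infer_instance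

-- ===== CLAIM =====
def Claim_equal_max_shops : Prop := ∀ (S : List Int) (E : List Int) (K : Int), Dom_max_shops S E K → Spec_max_shops S E K (max_shops S E K)

-- ===== LEMMAS AND PROOFS =====

-- the person array a tree represents: its leaf values, left to right
def pvFlat : PvTree → List Int
  | PvTree.leaf v => [v]
  | PvTree.node _ l r => pvFlat l ++ pvFlat r

-- well-formedness: every node's cached value is the min of its children's
def pvInv : PvTree → Prop
  | PvTree.leaf _ => True
  | PvTree.node m l r => pvInv l ∧ pvInv r ∧ m = min (pvTMin l) (pvTMin r)

lemma pvTMin_le (t : PvTree) (h : pvInv t) : ∀ x ∈ pvFlat t, pvTMin t ≤ x := by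
  induction t with
  | leaf v => intro x hx; simp [pvFlat] at hx; simp [pvTMin, hx]
  | node m l r ihl ihr =>
      obtain ⟨hl, hr, hm⟩ := h
      intro x hx
      simp [pvFlat] at hx
      rcases hx with hx | hx
      · calc pvTMin (PvTree.node m l r) = min (pvTMin l) (pvTMin r) := by simp [pvTMin, hm]
          _ ≤ pvTMin l := min_le_left _ _
          _ ≤ x := ihl hl x hx
      · calc pvTMin (PvTree.node m l r) = min (pvTMin l) (pvTMin r) := by simp [pvTMin, hm]
          _ ≤ pvTMin r := min_le_right _ _
          _ ≤ x := ihr hr x hx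

-- the assign/scan correspondence: on a well-formed tree, pvAssign behaves exactly
-- like A's left-to-right scan over the flattened array
lemma pvAssign_scan (start e : Int) (t : PvTree) (h : pvInv t) :
    (∀ nt, pvAssign start e t = some nt →
        pvScanA start e (pvFlat t) = (pvFlat nt, true) ∧ pvInv nt) ∧
    (pvAssign start e t = none → pvScanA start e (pvFlat t) = (pvFlat t, false)) := by
  induction t with
  | leaf v =>
      constructor
      · intro nt hnt
        simp only [pvAssign] at hnt
        split at hnt
        · cases hnt
          simp_all [pvFlat, pvScanA, pvInv]
        · cases hnt
      · intro hn
        simp only [pvAssign] at hn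
        split at hn
        · cases hn
        · simp_all [pvFlat, pvScanA]
  | node m l r ihl ihr =>
      obtain ⟨hl, hr, hm⟩ := h
      have scan_append : ∀ (xs ys : List Int),
          pvScanA start e (xs ++ ys) =
            (if (pvScanA start e xs).2 then ((pvScanA start e xs).1 ++ ys, true)
             else (xs ++ (pvScanA start e ys).1, (pvScanA start e ys).2)) := by
        intro xs ys
        induction xs with
        | nil => simp [pvScanA]
        | cons x xs ih =>
            by_cases hx : x ≤ start
            · simp [pvScanA, hx]
            · simp only [List.cons_append, pvScanA, hx, if_false, ih]
              split <;> simp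
      constructor
      · intro nt hnt
        simp only [pvAssign] at hnt
        split at hnt
        · cases hnt
        · rename_i hge
          cases hal : pvAssign start e l with
          | some nl =>
              rw [hal] at hnt
              simp only [Option.some.injEq] at hnt
              subst hnt
              obtain ⟨hscan, hinvl⟩ := (ihl hl).1 nl hal
              constructor
              · simp [pvFlat, scan_append, hscan]
              · exact ⟨hinvl, hr, rfl⟩
          | none =>
              rw [hal] at hnt
              have hlscan := (ihl hl).2 hal
              cases har : pvAssign start e r with
              | none => rw [har] at hnt; cases hnt
              | some nr =>
                  rw [har] at hnt
                  simp only [Option.some.injEq] at hnt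
                  subst hnt
                  obtain ⟨hscan, hinvr⟩ := (ihr hr).1 nr har
                  constructor
                  · simp [pvFlat, scan_append, hlscan, hscan]
                  · exact ⟨hl, hinvr, rfl⟩
      · intro hn
        simp only [pvAssign] at hn
        split at hn
        · -- start < m: no leaf value ≤ start, scan finds nothing
          rename_i hlt
          clear hn
          have hmin : ∀ x ∈ pvFlat (PvTree.node m l r), ¬ x ≤ start := by
            intro x hx hxle
            have := pvTMin_le (PvTree.node m l r) ⟨hl, hr, hm⟩ x hx
            simp [pvTMin] at this
            omega
          have : ∀ xs, (∀ x ∈ xs, ¬ x ≤ start) → pvScanA start e xs = (xs, false) := by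
            intro xs
            induction xs with
            | nil => intro _; simp [pvScanA]
            | cons x xs ih =>
                intro hall
                have hx := hall x (by simp)
                simp only [pvScanA, if_neg hx, ih (fun y hy => hall y (by simp [hy]))]
          exact this _ hmin
        · cases hal : pvAssign start e l with
          | some nl => rw [hal] at hn; cases hn
          | none =>
              rw [hal] at hn
              cases har : pvAssign start e r with
              | some nr => rw [har] at hn; cases hn
              | none =>
                  have h1 := (ihl hl).2 hal
                  have h2 := (ihr hr).2 har
                  simp [pvFlat, scan_append, h1, h2]
  -- (termination is structural)

lemma pvBuild_flat (k : Nat) (hk : 1 ≤ k) :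
    pvFlat (pvBuild k) = List.replicate k 0 ∧ pvInv (pvBuild k) ∧ pvTMin (pvBuild k) = 0 := by
  induction k using Nat.strong_induction_on with
  | _ k ih =>
      by_cases h : k ≤ 1
      · have : k = 1 := by omega
        subst this
        simp [pvBuild, pvFlat, pvInv, pvTMin]
      · have ih1 := ih (k / 2) (by omega) (by omega)
        have ih2 := ih (k - k / 2) (by omega) (by omega)
        rw [pvBuild, dif_neg h]
        refine ⟨?_, ⟨ih1.2.1, ih2.2.1, ?_⟩, by simp [pvTMin]⟩
        · simp only [pvFlat, ih1.1, ih2.1, ← List.replicate_add]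
          congr 1
          omega
        · rw [ih1.2.2, ih2.2.2]
          simp

-- the fold correspondence
lemma pvFold_eq (shops : List (Int × Int)) :
    ∀ (t : PvTree) (tv : Int), pvInv t →
      (shops.foldl pvStepA (pvFlat t, tv)).2 = (shops.foldl pvStepB (t, tv)).2 := by
  induction shops with
  | nil => intro t tv _; simp
  | cons shop rest ih =>
      intro t tv hinv
      simp only [List.foldl_cons]
      cases ha : pvAssign shop.1 shop.2 t with
      | some nt =>
          obtain ⟨hscan, hinv'⟩ := (pvAssign_scan shop.1 shop.2 t hinv).1 nt ha
          simp only [pvStepA, pvStepB, ha, hscan]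
          exact ih nt (tv + 1) hinv'
      | none =>
          have hscan := (pvAssign_scan shop.1 shop.2 t hinv).2 ha
          simp only [pvStepA, pvStepB, ha, hscan]
          exact ih t tv hinv

lemma pvFold_nil (shops : List (Int × Int)) (tv : Int) :
    (shops.foldl pvStepA (([] : List Int), tv)).2 = tv := by
  induction shops generalizing tv with
  | nil => simp
  | cons shop rest ih => simpa [pvStepA, pvScanA] using ih tv

-- ===== VERDICT =====
theorem max_shops_spec : Claim_equal_max_shops := by
  intro S E K _
  unfold Spec_max_shops max_shops max_shops_alt
  rw [PySem.List.pyRepeat_singleton]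
  by_cases hK : K ≤ 0
  · have : K.toNat = 0 := by omega
    simp only [hK, if_true, this, List.replicate_zero]
    exact pvFold_nil _ 0
  · have hk1 : 1 ≤ K.toNat := by omega
    obtain ⟨hflat, hinv, -⟩ := pvBuild_flat K.toNat hk1
    simp only [hK, if_false]
    rw [← hflat]
    exact pvFold_eq _ _ 0 hinv
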